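-- pv_equiv track=rewrite | github.com/ZachEnt/school-workspace | CSCI1110/assignment4/simulator.py | int_to_16b_2s_bitstring
-- ===== SOURCE A (Python) =====
-- def int_to_16b_2s_bitstring(the_int):
--     if the_int < 0:
--         bitstring = "1"
--         the_int += 2**15
--     else:
--         bitstring = "0"
--     for n in range(14, -1, -1):
--         place = 2**n
--         if place <= the_int:
--             bitstring += "1"
--             the_int -= place
--         else:
--             bitstring += "0"
--     assert the_int == 0
--     return bitstring
-- ===== SOURCE B (Python) =====
-- def int_to_16b_2s_bitstring(the_int):
--     if the_int < 0:
--         sign = "1"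
--         the_int += 2**15
--     else:
--         sign = "0"
--     assert 0 <= the_int < 2**15
--     return sign + format(the_int, '015b')
-- ===== Notes on version B (the rewrite author's own statement) =====
-- stated objective: idiomatic
-- what changed: Replaces the explicit per-bit greedy power-of-two subtraction loop with a single builtin binary-format conversion (format with a zero-padded binary spec) after the same sign-bit adjustment.
import Mathlib
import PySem

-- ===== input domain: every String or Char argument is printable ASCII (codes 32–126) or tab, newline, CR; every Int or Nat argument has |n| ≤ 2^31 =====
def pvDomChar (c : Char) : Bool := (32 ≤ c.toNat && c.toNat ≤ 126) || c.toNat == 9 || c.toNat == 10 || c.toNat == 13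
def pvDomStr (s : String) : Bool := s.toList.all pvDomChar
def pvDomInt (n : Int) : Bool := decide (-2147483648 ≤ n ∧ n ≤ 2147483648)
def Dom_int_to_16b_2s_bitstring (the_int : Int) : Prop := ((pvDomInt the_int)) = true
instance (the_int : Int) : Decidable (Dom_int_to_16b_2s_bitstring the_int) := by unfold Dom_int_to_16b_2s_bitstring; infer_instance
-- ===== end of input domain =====

-- B replaces A's explicit per-bit greedy power-of-two subtraction loop by a single
-- builtin binary-format conversion (idiomatic; same cost).

-- ===== PORT A =====
-- one loop iteration: place = 2**n; append '1' and subtract, or append '0'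
def pvStepA (st : List Char × Int) (n : Int) : List Char × Int :=
  let place : Int := 2 ^ n.toNat
  if place ≤ st.2 then (st.1 ++ ['1'], st.2 - place) else (st.1 ++ ['0'], st.2)

def int_to_16b_2s_bitstring (the_int : Int) : String :=
  let init : List Char × Int :=
    if the_int < 0 then (['1'], the_int + 2 ^ 15) else (['0'], the_int)
  let res := (PySem.List.pyRange 14 (-1) (-1)).foldl pvStepA init
  String.ofList res.1

-- ===== PORT B =====
-- port of format(x, '015b'): the 15 binary digits of x, most significant first
def pvBits15 (x : Int) : List Char :=
  ((List.range 15).reverse).map (fun i => if x.toNat.testBit i then '1' else '0')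

def int_to_16b_2s_bitstring_alt (the_int : Int) : String :=
  if the_int < 0 then String.ofList ('1' :: pvBits15 (the_int + 2 ^ 15))
  else String.ofList ('0' :: pvBits15 the_int)

-- ===== PRECONDITION & SPEC =====
-- A's end-of-loop assertion fails (AssertionError) exactly when the_int is outside
-- the representable 16-bit two's-complement range; Pre_ admits exactly the inputs
-- on which A returns.
def Pre_int_to_16b_2s_bitstring (the_int : Int) : Prop :=
  -32768 ≤ the_int ∧ the_int < 32768
instance (the_int : Int) : Decidable (Pre_int_to_16b_2s_bitstring the_int) := by
  unfold Pre_int_to_16b_2s_bitstring; infer_instance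
def pvWitness_int_to_16b_2s_bitstring : Int := (-5)

def Spec_int_to_16b_2s_bitstring (the_int : Int) (out : String) : Prop :=
  out = int_to_16b_2s_bitstring_alt the_int
instance (the_int : Int) (out : String) : Decidable (Spec_int_to_16b_2s_bitstring the_int out) := by
  unfold Spec_int_to_16b_2s_bitstring; infer_instance

-- ===== CLAIM (what is proved, stated in full; the proofs are below) =====
def Claim_equal_int_to_16b_2s_bitstring : Prop :=
  ∀ (the_int : Int), Dom_int_to_16b_2s_bitstring the_int →
    Pre_int_to_16b_2s_bitstring the_int →
    Spec_int_to_16b_2s_bitstring the_int (int_to_16b_2s_bitstring the_int)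

-- ===== LEMMAS AND PROOFS =====

-- the loop range is the concrete descending list 14,13,…,0
theorem pvRange_eq :
    PySem.List.pyRange 14 (-1) (-1) = ((List.range 15).reverse).map Int.ofNat := by
  decide

-- digit i of x is unchanged by removing the higher bit 2^(n+1)
theorem pv_testBit_sub (X : ℕ) (n i : ℕ) (hi : i ≤ n) (hX : 2 ^ (n + 1) ≤ X) :
    (X - 2 ^ (n + 1)).testBit i = X.testBit i := by
  obtain ⟨Y, rfl⟩ : ∃ Y, X = 2 ^ (n + 1) + Y := ⟨X - 2 ^ (n + 1), by omega⟩
  rw [Nat.add_sub_cancel_left, Nat.testBit_two_pow_add_gt (by omega)]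

-- greedy subtraction over [n, n-1, …, 0] emits exactly the binary digits
theorem pv_loop (n : ℕ) :
    ∀ (x : Int) (acc : List Char), 0 ≤ x → x < 2 ^ (n + 1) →
    (((List.range (n + 1)).reverse.map Int.ofNat).foldl pvStepA (acc, x))
      = (acc ++ ((List.range (n + 1)).reverse).map
            (fun i => if x.toNat.testBit i then '1' else '0'), 0) := by
  induction n with
  | zero =>
    intro x acc h0 h1
    interval_cases x <;> simp [pvStepA]
  | succ n ih =>
    intro x acc h0 h1
    have hrange : (List.range (n + 2)).reverse = (n + 1) :: (List.range (n + 1)).reverse := by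
      rw [List.range_succ]; simp
    rw [hrange]
    simp only [List.map_cons, List.foldl_cons]
    have hpow : ((((n : Int) + 1)).toNat) = n + 1 := by omega
    by_cases hle : (2 : Int) ^ (n + 1) ≤ x
    · have hstep : pvStepA (acc, x) (Int.ofNat (n + 1))
          = (acc ++ ['1'], x - 2 ^ (n + 1)) := by
        simp only [pvStepA]
        rw [show (Int.ofNat (n + 1)).toNat = n + 1 by simp]
        rw [if_pos hle]
      rw [hstep]
      have h0' : 0 ≤ x - 2 ^ (n + 1) := by omega
      have h1' : x - 2 ^ (n + 1) < 2 ^ (n + 1) := by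
        have : (2 : Int) ^ (n + 2) = 2 ^ (n + 1) + 2 ^ (n + 1) := by ring
        omega
      rw [ih _ _ h0' h1']
      have h2 : (x.toNat : Int) = x := Int.toNat_of_nonneg h0
      have hc : ((2 ^ (n + 1) : ℕ) : Int) = 2 ^ (n + 1) := by push_cast; ring
      have hXge : 2 ^ (n + 1) ≤ x.toNat := by
        have hle' : ((2 ^ (n + 1) : ℕ) : Int) ≤ (x.toNat : Int) := by rw [h2, hc]; exact hle
        exact_mod_cast hle'
      have hXlt : x.toNat < 2 ^ (n + 1 + 1) := by
        have h1c : ((2 ^ (n + 1 + 1) : ℕ) : Int) = 2 ^ (n + 1 + 1) := by push_cast; ring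
        have h1' : (x.toNat : Int) < ((2 ^ (n + 1 + 1) : ℕ) : Int) := by rw [h2, h1c]; exact h1
        exact_mod_cast h1'
      have hXbit : x.toNat.testBit (n + 1) = true := by
        obtain ⟨Y, hY⟩ : ∃ Y, x.toNat = 2 ^ (n + 1) + Y := ⟨x.toNat - 2 ^ (n + 1), by omega⟩
        have hYlt : Y < 2 ^ (n + 1) := by
          have : (2 : ℕ) ^ (n + 1 + 1) = 2 ^ (n + 1) + 2 ^ (n + 1) := by ring
          omega
        rw [hY, Nat.testBit_two_pow_add_eq, Nat.testBit_lt_two_pow hYlt]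
        rfl
      have hsub : (x - 2 ^ (n + 1)).toNat = x.toNat - 2 ^ (n + 1) := by
        rw [← h2, ← hc, Int.toNat_sub]; omega
      have hmap : (((List.range (n + 1)).reverse).map
            (fun i => if (x - 2 ^ (n + 1)).toNat.testBit i then '1' else '0'))
          = (((List.range (n + 1)).reverse).map
            (fun i => if x.toNat.testBit i then '1' else '0')) := by
        apply List.map_congr_left
        intro i hi
        have hi' : i ≤ n := by
          have := List.mem_range.mp (List.mem_reverse.mp hi); omega
        rw [hsub, pv_testBit_sub x.toNat n i hi' hXge]
      rw [hmap, hXbit]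
      simp
    · have hstep : pvStepA (acc, x) (Int.ofNat (n + 1)) = (acc ++ ['0'], x) := by
        simp only [pvStepA]
        rw [show (Int.ofNat (n + 1)).toNat = n + 1 by simp]
        rw [if_neg hle]
      rw [hstep]
      have h1' : x < 2 ^ (n + 1) := by omega
      rw [ih _ _ h0 h1']
      have hXbit : x.toNat.testBit (n + 1) = false := by
        apply Nat.testBit_lt_two_pow
        have h2 : (x.toNat : Int) = x := Int.toNat_of_nonneg h0
        have hc : ((2 ^ (n + 1) : ℕ) : Int) = 2 ^ (n + 1) := by push_cast; ring
        have h1'' : (x.toNat : Int) < ((2 ^ (n + 1) : ℕ) : Int) := by rw [h2, hc]; omega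
        exact_mod_cast h1''
      rw [hXbit]
      simp

-- ===== VERDICT (by name: the statement is the Claim_ definition above) =====
theorem int_to_16b_2s_bitstring_spec : Claim_equal_int_to_16b_2s_bitstring := by
  intro the_int _ hpre
  obtain ⟨hlo, hhi⟩ := hpre
  unfold Spec_int_to_16b_2s_bitstring
  unfold int_to_16b_2s_bitstring int_to_16b_2s_bitstring_alt
  by_cases hneg : the_int < 0
  · simp only [if_pos hneg]
    rw [pvRange_eq, pv_loop 14 (the_int + 2 ^ 15) ['1'] (by norm_num; omega)
      (by norm_num; omega)]
    simp [pvBits15]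
  · simp only [if_neg hneg]
    rw [pvRange_eq, pv_loop 14 the_int ['0'] (by omega) (by norm_num; omega)]
    simp [pvBits15]
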